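-- pv_equiv track=rewrite | github.com/vigneshsabapathi/python-algorithms | cellular_automata/one_dimensional_optimized.py | run_bitwise
-- ===== SOURCE A (Python) =====
-- def run_bitwise(rule_number: int, width: int, generations: int) -> list[list[int]]:
--     """
--     Entire row stored as a single Python integer. Neighbourhood computed
--     with bit shifts and masks.
--
--     >>> run_bitwise(90, 7, 3)
--     [[0, 0, 0, 1, 0, 0, 0], [0, 0, 1, 0, 1, 0, 0], [0, 1, 0, 0, 0, 1, 0], [1, 0, 1, 0, 1, 0, 1]]
--     """
--     row = 1 << (width // 2)
--     mask = (1 << width) - 1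
--
--     def int_to_list(val: int) -> list[int]:
--         return [(val >> (width - 1 - i)) & 1 for i in range(width)]
--
--     history = [int_to_list(row)]
--
--     for _ in range(generations):
--         new_row = 0
--         for bit in range(width):
--             # Extract 3-bit neighbourhood (MSB to LSB order)
--             left = (row >> (bit + 1)) & 1 if bit + 1 < width else 0
--             center = (row >> bit) & 1
--             right = (row >> (bit - 1)) & 1 if bit > 0 else 0
--             pattern = left * 4 + center * 2 + right
--             if (rule_number >> pattern) & 1:
--                 new_row |= 1 << bit
--         row = new_row & mask
--         history.append(int_to_list(row))
--     return history
-- ===== SOURCE B (Python) =====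
-- def run_bitwise(rule_number: int, width: int, generations: int) -> list[list[int]]:
--     """Bit-parallel update: per generation build whole-row left/center/right
--     neighbor planes with two shifts, then OR together one row-wide mask per
--     active rule pattern (8 iterations, independent of width), instead of
--     extracting and re-packing each cell's 3-bit neighborhood."""
--     mask = (1 << width) - 1
--     row = 1 << (width // 2)
--
--     def int_to_list(val: int) -> list[int]:
--         return [(val >> (width - 1 - i)) & 1 for i in range(width)]
--
--     history = [int_to_list(row)]
--     for _ in range(generations):
--         L, C, R = row >> 1, row, (row << 1) & mask
--         new_row = 0
--         for p in range(8):
--             if (rule_number >> p) & 1: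
--                 new_row |= (L if p & 4 else L ^ mask) \
--                          & (C if p & 2 else C ^ mask) \
--                          & (R if p & 1 else R ^ mask)
--         row = new_row
--         history.append(int_to_list(row))
--     return history
-- ===== Notes on version B (the rewrite author's own statement) =====
-- stated objective: faster
-- what changed: B replaces A's per-cell inner loop (extracting each cell's 3-bit neighborhood with shifts and re-packing it bit by bit) by a bit-parallel update: per generation it builds whole-row left/center/right neighbor planes with two shifts and ORs in one row-wide mask per active rule pattern, so the inner loop runs 8 times regardless of width.
import Mathlib
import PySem

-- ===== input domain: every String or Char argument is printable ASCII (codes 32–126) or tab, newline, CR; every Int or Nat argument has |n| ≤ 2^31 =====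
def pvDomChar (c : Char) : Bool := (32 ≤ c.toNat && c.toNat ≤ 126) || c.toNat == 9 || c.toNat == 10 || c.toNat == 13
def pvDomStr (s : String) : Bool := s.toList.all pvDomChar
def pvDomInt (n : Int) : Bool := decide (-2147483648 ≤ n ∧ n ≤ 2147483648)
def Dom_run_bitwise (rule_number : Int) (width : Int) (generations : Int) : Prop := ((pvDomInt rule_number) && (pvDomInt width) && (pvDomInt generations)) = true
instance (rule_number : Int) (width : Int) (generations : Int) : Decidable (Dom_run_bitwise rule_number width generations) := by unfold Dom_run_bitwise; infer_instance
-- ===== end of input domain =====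

-- B replaces A's per-cell inner loop by a bit-parallel update: per generation it
-- builds whole-row left/center/right neighbor planes with two shifts and ORs in one
-- row-wide mask per active rule pattern (8 iterations regardless of width).
-- Equivalence of the RETURN values on Pre_ (width >= 0) is proved below.

-- ===== PORT A =====
-- int_to_list(val): [(val >> (width-1-i)) & 1 for i in range(width)]  (shared helper,
-- identical in A and B; shift counts width-1-i are ≥ 0 for i in range(width), so .toNat is exact)
def pvIntToList (width : Int) (val : Int) : List Int :=
  (PySem.List.pyRange 0 width 1).map (fun i => PySem.Int.band (val >>> (width - 1 - i).toNat) 1)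

-- history.append(...) is modelled by a cons accumulator, reversed once at the end (same list)
def run_bitwise (rule_number : Int) (width : Int) (generations : Int) : List (List Int) :=
  -- row = 1 << (width // 2); mask = (1 << width) - 1
  -- (shift counts are ≥ 0 exactly on Pre_: Python raises ValueError for width < 0)
  let row : Int := (1 : Int) <<< (PySem.Int.floordiv width 2).toNat
  let mask : Int := ((1 : Int) <<< width.toNat) - 1
  let st := (PySem.List.pyRange 0 generations 1).foldl
    (fun (st : Int × List (List Int)) (_ : Int) =>
      let new_row : Int := (PySem.List.pyRange 0 width 1).foldl
        (fun (new_row : Int) (bit : Int) =>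
          -- bit ∈ range(width) so bit, bit+1 are ≥ 0 and pattern ∈ [0,7]: .toNat exact
          let left : Int := if bit + 1 < width then PySem.Int.band (st.1 >>> (bit + 1).toNat) 1 else 0
          let center : Int := PySem.Int.band (st.1 >>> bit.toNat) 1
          let right : Int := if bit > 0 then PySem.Int.band (st.1 >>> (bit - 1).toNat) 1 else 0
          let pattern : Int := left * 4 + center * 2 + right
          if PySem.Int.band (rule_number >>> pattern.toNat) 1 ≠ 0 then
            PySem.Int.bor new_row ((1 : Int) <<< bit.toNat)
          else new_row) 0
      let row' : Int := PySem.Int.band new_row mask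
      (row', pvIntToList width row' :: st.2))
    (row, [pvIntToList width row])
  st.2.reverse

-- ===== PORT B =====
-- per generation: L, C, R = row >> 1, row, (row << 1) & mask; then for p in range(8),
-- if rule bit p is set, OR in (L or L^mask) & (C or C^mask) & (R or R^mask) picking
-- direct/complement planes by the bits of p  (p and the plane values are ≥ 0: .toNat exact)
def run_bitwise_alt (rule_number : Int) (width : Int) (generations : Int) : List (List Int) :=
  let mask : Int := ((1 : Int) <<< width.toNat) - 1
  let row : Int := (1 : Int) <<< (PySem.Int.floordiv width 2).toNat
  let st := (PySem.List.pyRange 0 generations 1).foldl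
    (fun (st : Int × List (List Int)) (_ : Int) =>
      let L : Int := st.1 >>> 1
      let C : Int := st.1
      let R : Int := PySem.Int.band (st.1 <<< 1) mask
      let new_row : Int := (PySem.List.pyRange 0 8 1).foldl
        (fun (n : Int) (p : Int) =>
          if PySem.Int.band (rule_number >>> p.toNat) 1 ≠ 0 then
            PySem.Int.bor n (PySem.Int.band (PySem.Int.band
              (if PySem.Int.band p 4 ≠ 0 then L else PySem.Int.bxor L mask)
              (if PySem.Int.band p 2 ≠ 0 then C else PySem.Int.bxor C mask))
              (if PySem.Int.band p 1 ≠ 0 then R else PySem.Int.bxor R mask))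
          else n) 0
      (new_row, pvIntToList width new_row :: st.2))
    (row, [pvIntToList width row])
  st.2.reverse

-- ===== PRECONDITION & SPEC =====
-- Pre_ excludes width < 0, where A raises ValueError ('negative shift count') at 1 << (width // 2).
def Pre_run_bitwise (rule_number : Int) (width : Int) (generations : Int) : Prop := 0 ≤ width
instance (rule_number : Int) (width : Int) (generations : Int) : Decidable (Pre_run_bitwise rule_number width generations) := by unfold Pre_run_bitwise; infer_instance
def pvWitness_run_bitwise : Int × Int × Int := (90, 7, 3)

def Spec_run_bitwise (rule_number : Int) (width : Int) (generations : Int) (out : List (List Int)) : Prop := out = run_bitwise_alt rule_number width generations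
instance (rule_number : Int) (width : Int) (generations : Int) (out : List (List Int)) : Decidable (Spec_run_bitwise rule_number width generations out) := by unfold Spec_run_bitwise; infer_instance

-- ===== CLAIM (what is proved, stated in full; the proofs are below) =====
def Claim_equal_run_bitwise : Prop := ∀ (rule_number : Int) (width : Int) (generations : Int), Dom_run_bitwise rule_number width generations → Pre_run_bitwise rule_number width generations → Spec_run_bitwise rule_number width generations (run_bitwise rule_number width generations)

-- ===== LEMMAS AND PROOFS =====

-- rule bit p (shared truth test of both ports)
def pvRb (rule : Int) (p : Nat) : Bool := PySem.Int.band (rule >>> p) 1 ≠ 0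

-- A's per-bit predicate at bit j of row M (the body of A's inner loop, Nat-indexed).
def pvCondA (rule_number : Int) (M : Nat) (W : Nat) (j : Nat) : Bool :=
  let left : Int := if (j : Int) + 1 < (W : Int) then PySem.Int.band ((M : Int) >>> (j + 1)) 1 else 0
  let center : Int := PySem.Int.band ((M : Int) >>> j) 1
  let right : Int := if (j : Int) > 0 then PySem.Int.band ((M : Int) >>> (j - 1 : Nat)) 1 else 0
  PySem.Int.band (rule_number >>> (left * 4 + center * 2 + right).toNat) 1 ≠ 0

-- Nat model of A's inner fold over range k.
def pvNewRowNatAux (rule_number : Int) (M : Nat) (W : Nat) (k : Nat) : Nat :=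
  (List.range k).foldl (fun n j => if pvCondA rule_number M W j then n ||| (1 <<< j) else n) 0

-- B's pattern mask for p, Nat model
def pvTerm (mask L C R : Nat) (p : Nat) : Nat :=
  ((if p &&& 4 ≠ 0 then L else L ^^^ mask) &&&
   (if p &&& 2 ≠ 0 then C else C ^^^ mask)) &&&
  (if p &&& 1 ≠ 0 then R else R ^^^ mask)

-- Nat model of B's inner fold over range k.
def pvNewRowB (rule : Int) (mask L C R : Nat) (k : Nat) : Nat :=
  (List.range k).foldl (fun n p => if pvRb rule p then n ||| pvTerm mask L C R p else n) 0

theorem pvNewRowNatAux_testBit (rule_number : Int) (M W : Nat) : ∀ (k j : Nat),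
    (pvNewRowNatAux rule_number M W k).testBit j = (decide (j < k) && pvCondA rule_number M W j) := by
  intro k
  induction k with
  | zero => intro j; simp [pvNewRowNatAux]
  | succ k ih =>
    intro j
    have hstep : pvNewRowNatAux rule_number M W (k+1)
        = (if pvCondA rule_number M W k then pvNewRowNatAux rule_number M W k ||| (1 <<< k)
           else pvNewRowNatAux rule_number M W k) := by
      simp [pvNewRowNatAux, List.range_succ]
    rw [hstep]
    have h1 : (1 <<< k : Nat) = 2 ^ k := by simp [Nat.shiftLeft_eq]
    by_cases hc : pvCondA rule_number M W k
    · rw [if_pos hc, Nat.testBit_lor, ih j, h1, Nat.testBit_two_pow]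
      by_cases hjk : j = k
      · subst hjk; simp [hc]
      · simp only [Ne.symm hjk, Bool.or_false, decide_false]
        rw [show (decide (j < k + 1)) = decide (j < k) from by simp; omega]
    · rw [if_neg hc, ih j]
      by_cases hjk : j = k
      · subst hjk; simp [hc]
      · by_cases hj : j < k <;> simp [hj, show (j < k + 1) ↔ j < k by omega]

theorem pvNewRowB_testBit (rule : Int) (mask L C R : Nat) : ∀ (k j : Nat),
    (pvNewRowB rule mask L C R k).testBit j
      = (List.range k).any (fun p => pvRb rule p && (pvTerm mask L C R p).testBit j) := by
  intro k
  induction k with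
  | zero => intro j; simp [pvNewRowB]
  | succ k ih =>
    intro j
    have hstep : pvNewRowB rule mask L C R (k+1)
        = (if pvRb rule k then pvNewRowB rule mask L C R k ||| pvTerm mask L C R k
           else pvNewRowB rule mask L C R k) := by
      simp [pvNewRowB, List.range_succ]
    rw [hstep, List.range_succ, List.any_append]
    by_cases hc : pvRb rule k
    · rw [if_pos hc, Nat.testBit_lor, ih j]; simp [hc]
    · rw [if_neg hc, ih j]; simp [hc]

theorem pvInnerFold_eq (rule_number : Int) (M W : Nat) :
    (PySem.List.pyRange 0 (W : Int) 1).foldl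
      (fun (new_row : Int) (bit : Int) =>
        let left : Int := if bit + 1 < (W : Int) then PySem.Int.band ((M : Int) >>> (bit + 1).toNat) 1 else 0
        let center : Int := PySem.Int.band ((M : Int) >>> bit.toNat) 1
        let right : Int := if bit > 0 then PySem.Int.band ((M : Int) >>> (bit - 1).toNat) 1 else 0
        let pattern : Int := left * 4 + center * 2 + right
        if PySem.Int.band (rule_number >>> pattern.toNat) 1 ≠ 0 then
          PySem.Int.bor new_row ((1 : Int) <<< bit.toNat)
        else new_row) 0
    = ((pvNewRowNatAux rule_number M W W : Nat) : Int) := by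
  rw [PySem.List.pyRange_one]
  rw [show ((W : Int) - 0).toNat = W by omega]
  rw [List.foldl_map]
  suffices h : ∀ k, (List.range k).foldl
      (fun (new_row : Int) (j : Nat) =>
        let bit : Int := 0 + (j : Int)
        let left : Int := if bit + 1 < (W : Int) then PySem.Int.band ((M : Int) >>> (bit + 1).toNat) 1 else 0
        let center : Int := PySem.Int.band ((M : Int) >>> bit.toNat) 1
        let right : Int := if bit > 0 then PySem.Int.band ((M : Int) >>> (bit - 1).toNat) 1 else 0
        let pattern : Int := left * 4 + center * 2 + right
        if PySem.Int.band (rule_number >>> pattern.toNat) 1 ≠ 0 then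
          PySem.Int.bor new_row ((1 : Int) <<< bit.toNat)
        else new_row) 0
      = ((pvNewRowNatAux rule_number M W k : Nat) : Int) from h W
  intro k
  induction k with
  | zero => simp [pvNewRowNatAux]
  | succ k ih =>
    rw [List.range_succ, List.foldl_append, ih]
    show (let bit : Int := 0 + (k : Int)
        let left : Int := if bit + 1 < (W : Int) then PySem.Int.band ((M : Int) >>> (bit + 1).toNat) 1 else 0
        let center : Int := PySem.Int.band ((M : Int) >>> bit.toNat) 1
        let right : Int := if bit > 0 then PySem.Int.band ((M : Int) >>> (bit - 1).toNat) 1 else 0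
        let pattern : Int := left * 4 + center * 2 + right
        if PySem.Int.band (rule_number >>> pattern.toNat) 1 ≠ 0 then
          PySem.Int.bor ((pvNewRowNatAux rule_number M W k : Nat) : Int) ((1 : Int) <<< bit.toNat)
        else ((pvNewRowNatAux rule_number M W k : Nat) : Int))
      = ((pvNewRowNatAux rule_number M W (k+1) : Nat) : Int)
    have hstep : pvNewRowNatAux rule_number M W (k+1)
        = (if pvCondA rule_number M W k then pvNewRowNatAux rule_number M W k ||| (1 <<< k)
           else pvNewRowNatAux rule_number M W k) := by
      simp [pvNewRowNatAux, List.range_succ]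
    rw [hstep]
    have htn1 : ((0 : Int) + (k : Int) + 1).toNat = k + 1 := by omega
    have htn0 : ((0 : Int) + (k : Int)).toNat = k := by omega
    simp only [zero_add] at htn1 htn0 ⊢
    rw [htn1, htn0]
    have hbit : ((k : Int) - 1).toNat = k - 1 := by omega
    rw [hbit]
    have hcond : (((k : Int)) > 0) ↔ 0 < k := by exact_mod_cast Iff.rfl
    rw [show PySem.Int.bor ((pvNewRowNatAux rule_number M W k : Nat) : Int) ((1:Int) <<< k)
        = ((pvNewRowNatAux rule_number M W k ||| 1 <<< k : Nat) : Int) from by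
      rw [show ((1:Int) <<< k) = (((1 <<< k : Nat)) : Int) from by exact_mod_cast rfl, PySem.Int.bor_natCast]]
    unfold pvCondA
    simp only [gt_iff_lt, hcond]
    split_ifs with h h' h' <;> simp_all

theorem pvBand_one_nat (m : Nat) : PySem.Int.band (m : Int) 1 = ((m &&& 1 : Nat) : Int) := by
  simpa using PySem.Int.band_natCast m 1

theorem pvCast_shiftRight (m k : Nat) : ((m : Int) >>> k) = ((m >>> k : Nat) : Int) := by exact_mod_cast rfl

theorem pvShr_band_one (m j : Nat) : PySem.Int.band ((m : Int) >>> j) 1 = if m.testBit j then (1 : Int) else 0 := by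
  rw [pvCast_shiftRight, pvBand_one_nat, Nat.and_one_is_mod]
  rcases Nat.mod_two_eq_zero_or_one (m >>> j) with h | h <;>
    simp [Nat.testBit, Nat.one_and_eq_mod_two, h]

-- B's inner fold over range(8), cast down to the Nat model
theorem pvInnerFoldB_eq (rule : Int) (mask L C R : Nat) :
    (PySem.List.pyRange 0 8 1).foldl
      (fun (n : Int) (p : Int) =>
        if PySem.Int.band (rule >>> p.toNat) 1 ≠ 0 then
          PySem.Int.bor n (PySem.Int.band (PySem.Int.band
            (if PySem.Int.band p 4 ≠ 0 then (L : Int) else PySem.Int.bxor (L : Int) (mask : Int))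
            (if PySem.Int.band p 2 ≠ 0 then (C : Int) else PySem.Int.bxor (C : Int) (mask : Int)))
            (if PySem.Int.band p 1 ≠ 0 then (R : Int) else PySem.Int.bxor (R : Int) (mask : Int)))
        else n) 0
    = ((pvNewRowB rule mask L C R 8 : Nat) : Int) := by
  rw [PySem.List.pyRange_one]
  rw [show ((8 : Int) - 0).toNat = 8 by omega]
  rw [List.foldl_map]
  suffices h : ∀ k, (List.range k).foldl
      (fun (n : Int) (pj : Nat) =>
        let p : Int := 0 + (pj : Int)
        if PySem.Int.band (rule >>> p.toNat) 1 ≠ 0 then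
          PySem.Int.bor n (PySem.Int.band (PySem.Int.band
            (if PySem.Int.band p 4 ≠ 0 then (L : Int) else PySem.Int.bxor (L : Int) (mask : Int))
            (if PySem.Int.band p 2 ≠ 0 then (C : Int) else PySem.Int.bxor (C : Int) (mask : Int)))
            (if PySem.Int.band p 1 ≠ 0 then (R : Int) else PySem.Int.bxor (R : Int) (mask : Int)))
        else n) 0
      = ((pvNewRowB rule mask L C R k : Nat) : Int) from h 8
  intro k
  induction k with
  | zero => simp [pvNewRowB]
  | succ k ih =>
    rw [List.range_succ, List.foldl_append, ih]
    simp only [List.foldl_cons, List.foldl_nil]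
    have hstep : pvNewRowB rule mask L C R (k+1)
        = (if pvRb rule k then pvNewRowB rule mask L C R k ||| pvTerm mask L C R k
           else pvNewRowB rule mask L C R k) := by
      simp [pvNewRowB, List.range_succ]
    rw [hstep]
    have hb4 : PySem.Int.band ((0 : Int) + (k : Int)) 4 = ((k &&& 4 : Nat) : Int) := by
      rw [zero_add]; exact_mod_cast PySem.Int.band_natCast k 4
    have hb2 : PySem.Int.band ((0 : Int) + (k : Int)) 2 = ((k &&& 2 : Nat) : Int) := by
      rw [zero_add]; exact_mod_cast PySem.Int.band_natCast k 2
    have hb1 : PySem.Int.band ((0 : Int) + (k : Int)) 1 = ((k &&& 1 : Nat) : Int) := by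
      rw [zero_add]; exact_mod_cast PySem.Int.band_natCast k 1
    have htn : ((0 : Int) + (k : Int)).toNat = k := by omega
    have hfac : ∀ (X : Nat) (m : Nat),
        (if ((m : Nat) : Int) ≠ 0 then (X : Int) else PySem.Int.bxor (X : Int) (mask : Int))
          = (((if m ≠ 0 then X else X ^^^ mask) : Nat) : Int) := by
      intro X m
      by_cases hm : m = 0
      · subst hm; simp [PySem.Int.bxor_natCast]
      · rw [if_pos (by exact_mod_cast hm), if_pos hm]
    simp only [hb4, hb2, hb1, htn, hfac]
    rw [show PySem.Int.band (((if k &&& 4 ≠ 0 then L else L ^^^ mask) : Nat) : Int)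
          (((if k &&& 2 ≠ 0 then C else C ^^^ mask) : Nat) : Int)
        = ((((if k &&& 4 ≠ 0 then L else L ^^^ mask) &&& (if k &&& 2 ≠ 0 then C else C ^^^ mask)) : Nat) : Int)
      from PySem.Int.band_natCast _ _]
    rw [show PySem.Int.band ((((if k &&& 4 ≠ 0 then L else L ^^^ mask) &&& (if k &&& 2 ≠ 0 then C else C ^^^ mask)) : Nat) : Int)
          (((if k &&& 1 ≠ 0 then R else R ^^^ mask) : Nat) : Int)
        = ((pvTerm mask L C R k : Nat) : Int)
      from PySem.Int.band_natCast _ _]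
    unfold pvRb
    by_cases hc : PySem.Int.band (rule >>> k) 1 ≠ 0
    · rw [if_pos hc, if_pos (by simpa using hc), PySem.Int.bor_natCast]
    · rw [if_neg hc, if_neg (by simpa using hc)]

-- the 8-pattern disjunction collapses to the single matching pattern
theorem pvAny8 (rule : Int) (a b c : Bool) :
    (List.range 8).any (fun p => pvRb rule p &&
      (((if p &&& 4 ≠ 0 then a else !a) && (if p &&& 2 ≠ 0 then b else !b)) && (if p &&& 1 ≠ 0 then c else !c)))
      = pvRb rule ((if a then 4 else 0) + (if b then 2 else 0) + (if c then 1 else 0)) := by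
  have h8 : List.range 8 = [0,1,2,3,4,5,6,7] := by rfl
  rcases a <;> rcases b <;> rcases c <;> simp [h8]

-- A's neighborhood condition written through the packed pattern index
theorem pvCondA_eq (rule : Int) (M W j : Nat) (hj : j < W) (hM : M < 2 ^ W) :
    pvCondA rule M W j
      = pvRb rule ((if M.testBit (j+1) then 4 else 0) + (if M.testBit j then 2 else 0)
                   + (if decide (1 ≤ j) && M.testBit (j-1) then 1 else 0)) := by
  unfold pvCondA pvRb
  have hleft : (if (j : Int) + 1 < (W : Int) then PySem.Int.band ((M : Int) >>> (j + 1)) 1 else 0)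
      = (if M.testBit (j+1) then (1 : Int) else 0) := by
    by_cases h : (j : Int) + 1 < (W : Int)
    · rw [if_pos h, pvShr_band_one]
    · have hjW : j + 1 = W := by omega
      rw [if_neg h, hjW, Nat.testBit_lt_two_pow hM, if_neg (by simp)]
  have hcen : PySem.Int.band ((M : Int) >>> j) 1 = (if M.testBit j then (1 : Int) else 0) :=
    pvShr_band_one M j
  have hright : (if (j : Int) > 0 then PySem.Int.band ((M : Int) >>> (j - 1 : Nat)) 1 else 0)
      = (if decide (1 ≤ j) && M.testBit (j-1) then (1 : Int) else 0) := by
    by_cases h : 1 ≤ j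
    · rw [if_pos (by exact_mod_cast h), pvShr_band_one]
      simp [h]
    · have hj0 : j = 0 := by omega
      subst hj0
      simp
  rw [hleft, hcen, hright]
  rcases hL : M.testBit (j+1) <;> rcases hC : M.testBit j <;>
    rcases hR : (decide (1 ≤ j) && M.testBit (j-1)) <;> norm_num <;> exact Iff.rfl

-- M < 2^W (or W = 0): B's 8-pattern OR equals A's assembled row, masked
theorem pvStepB (rule : Int) (W M : Nat) (hM : M < 2 ^ W ∨ W = 0) :
    pvNewRowB rule (2 ^ W - 1) (M >>> 1) M ((M <<< 1) &&& (2 ^ W - 1)) 8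
      = pvNewRowNatAux rule M W W &&& (2 ^ W - 1) := by
  rcases hM with hM | hW
  · apply Nat.eq_of_testBit_eq
    intro j
    rw [Nat.testBit_land, pvNewRowNatAux_testBit, Nat.testBit_two_pow_sub_one,
      pvNewRowB_testBit]
    by_cases hj : j < W
    · have hterm : ∀ p : Nat, (pvTerm (2 ^ W - 1) (M >>> 1) M ((M <<< 1) &&& (2 ^ W - 1)) p).testBit j
          = (((if p &&& 4 ≠ 0 then M.testBit (j+1) else !M.testBit (j+1)) &&
              (if p &&& 2 ≠ 0 then M.testBit j else !M.testBit j)) &&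
             (if p &&& 1 ≠ 0 then (decide (1 ≤ j) && M.testBit (j-1)) else !(decide (1 ≤ j) && M.testBit (j-1)))) := by
        intro p
        have hLb : (M >>> 1).testBit j = M.testBit (j+1) := by
          rw [Nat.testBit_shiftRight, Nat.add_comm]
        have hRb : ((M <<< 1) &&& (2 ^ W - 1)).testBit j = (decide (1 ≤ j) && M.testBit (j-1)) := by
          rw [Nat.testBit_land, Nat.testBit_shiftLeft, Nat.testBit_two_pow_sub_one]
          simp [hj]
        unfold pvTerm
        split_ifs <;>
          simp_all [Nat.testBit_land, Nat.testBit_xor, Nat.testBit_two_pow_sub_one, hj]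
      simp only [hterm]
      rw [pvAny8, pvCondA_eq rule M W j hj hM]
      simp [hj]
    · have hCb : M.testBit j = false :=
        Nat.testBit_lt_two_pow (lt_of_lt_of_le hM (Nat.pow_le_pow_right (by norm_num) (by omega)))
      have hmb : (2 ^ W - 1).testBit j = false := by
        rw [Nat.testBit_two_pow_sub_one]; simp [hj]
      rw [List.any_eq_false.mpr, decide_eq_false hj]
      · simp
      · intro p _
        unfold pvTerm
        split_ifs <;>
          simp [Nat.testBit_land, Nat.testBit_xor, hCb, hmb]
  · subst hW
    have h20 : (2 : Nat) ^ 0 - 1 = 0 := rfl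
    rw [h20, Nat.and_zero, Nat.and_zero]
    have hterm0 : ∀ p, pvTerm 0 (M >>> 1) M 0 p = 0 := by
      intro p
      unfold pvTerm
      split_ifs <;> simp
    have hfold : ∀ (l : List Nat) (n : Nat),
        l.foldl (fun n p => if pvRb rule p then n ||| pvTerm 0 (M >>> 1) M 0 p else n) n = n := by
      intro l
      induction l with
      | nil => intro n; rfl
      | cons x xs ih => intro n; rw [List.foldl_cons]; split_ifs <;> simp [hterm0, ih]
    unfold pvNewRowB
    exact hfold _ 0

-- both generation folds, run in lockstep (masks already written as Nat casts)
theorem pvGenFold (rule : Int) (W : Nat) (gs : List Int) : ∀ (M : Nat), (M < 2 ^ W ∨ W = 0) → ∀ (hist : List (List Int)),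
    (gs.foldl (fun (st : Int × List (List Int)) (_ : Int) =>
      let new_row : Int := (PySem.List.pyRange 0 (W : Int) 1).foldl
        (fun (new_row : Int) (bit : Int) =>
          let left : Int := if bit + 1 < (W : Int) then PySem.Int.band (st.1 >>> (bit + 1).toNat) 1 else 0
          let center : Int := PySem.Int.band (st.1 >>> bit.toNat) 1
          let right : Int := if bit > 0 then PySem.Int.band (st.1 >>> (bit - 1).toNat) 1 else 0
          let pattern : Int := left * 4 + center * 2 + right
          if PySem.Int.band (rule >>> pattern.toNat) 1 ≠ 0 then
            PySem.Int.bor new_row ((1 : Int) <<< bit.toNat)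
          else new_row) 0
      let row' : Int := PySem.Int.band new_row ((2 ^ W - 1 : Nat) : Int)
      (row', pvIntToList (W : Int) row' :: st.2)) ((M : Int), hist)).2
    = (gs.foldl (fun (st : Int × List (List Int)) (_ : Int) =>
      let L : Int := st.1 >>> 1
      let C : Int := st.1
      let R : Int := PySem.Int.band (st.1 <<< 1) ((2 ^ W - 1 : Nat) : Int)
      let new_row : Int := (PySem.List.pyRange 0 8 1).foldl
        (fun (n : Int) (p : Int) =>
          if PySem.Int.band (rule >>> p.toNat) 1 ≠ 0 then
            PySem.Int.bor n (PySem.Int.band (PySem.Int.band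
              (if PySem.Int.band p 4 ≠ 0 then L else PySem.Int.bxor L ((2 ^ W - 1 : Nat) : Int))
              (if PySem.Int.band p 2 ≠ 0 then C else PySem.Int.bxor C ((2 ^ W - 1 : Nat) : Int)))
              (if PySem.Int.band p 1 ≠ 0 then R else PySem.Int.bxor R ((2 ^ W - 1 : Nat) : Int)))
          else n) 0
      (new_row, pvIntToList (W : Int) new_row :: st.2)) ((M : Int), hist)).2 := by
  induction gs with
  | nil => intro M hM hist; rfl
  | cons g gs ih =>
    intro M hM hist
    rw [List.foldl_cons, List.foldl_cons]
    dsimp only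
    rw [pvInnerFold_eq rule M W]
    rw [show PySem.Int.band ((pvNewRowNatAux rule M W W : Nat) : Int) ((2 ^ W - 1 : Nat) : Int)
        = ((pvNewRowNatAux rule M W W &&& (2 ^ W - 1) : Nat) : Int) from PySem.Int.band_natCast _ _]
    rw [show ((M : Int) >>> 1) = ((M >>> 1 : Nat) : Int) from pvCast_shiftRight M 1]
    rw [show PySem.Int.band ((M : Int) <<< 1) ((2 ^ W - 1 : Nat) : Int)
        = (((M <<< 1) &&& (2 ^ W - 1) : Nat) : Int) from by
      rw [show ((M : Int) <<< 1) = ((M <<< 1 : Nat) : Int) from by exact_mod_cast rfl,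
        PySem.Int.band_natCast]]
    rw [pvInnerFoldB_eq rule (2 ^ W - 1) (M >>> 1) M ((M <<< 1) &&& (2 ^ W - 1))]
    rw [pvStepB rule W M hM]
    exact ih (pvNewRowNatAux rule M W W &&& (2 ^ W - 1))
      (Or.inl (lt_of_le_of_lt Nat.and_le_right (by have := Nat.one_le_two_pow (n := W); omega)))
      (pvIntToList (W : Int) ((pvNewRowNatAux rule M W W &&& (2 ^ W - 1) : Nat) : Int) :: hist)

-- ===== VERDICT (by name: the statement is the Claim_ definition above) =====
theorem run_bitwise_spec : Claim_equal_run_bitwise := by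
  intro rule_number width generations _ hpre
  unfold Spec_run_bitwise
  obtain ⟨W, rfl⟩ : ∃ W : Nat, width = (W : Int) :=
    ⟨width.toNat, (Int.toNat_of_nonneg hpre).symm⟩
  unfold run_bitwise run_bitwise_alt
  simp only [Int.toNat_natCast]
  have hrow0 : (1:Int) <<< (PySem.Int.floordiv (W : Int) 2).toNat = ((2 ^ (W / 2) : Nat) : Int) := by
    have he : PySem.Int.floordiv (W : Int) 2 = ((W / 2 : Nat) : Int) := by
      simp only [PySem.Int.floordiv]
      rw [Int.fdiv_eq_ediv]
      omega
    rw [he, Int.toNat_natCast,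
      show ((1:Int) <<< (W / 2)) = ((1 <<< (W / 2) : Nat) : Int) from by exact_mod_cast rfl,
      Nat.shiftLeft_eq, one_mul]
  have hmask : ((1:Int) <<< W) - 1 = ((2 ^ W - 1 : Nat) : Int) := by
    rw [show ((1:Int) <<< W) = ((1 <<< W : Nat) : Int) from by exact_mod_cast rfl,
      Nat.shiftLeft_eq, one_mul]
    have := Nat.one_le_two_pow (n := W)
    push_cast [Nat.cast_sub this]
    ring
  rw [hrow0, hmask]
  have hM : (2 ^ (W / 2) : Nat) < 2 ^ W ∨ W = 0 := by
    rcases Nat.eq_zero_or_pos W with h | h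
    · exact Or.inr h
    · exact Or.inl (Nat.pow_lt_pow_right (by norm_num) (by omega))
  have h := pvGenFold rule_number W (PySem.List.pyRange 0 generations 1) (2 ^ (W / 2)) hM
    [pvIntToList (W : Int) ((2 ^ (W / 2) : Nat) : Int)]
  dsimp only at h
  exact congrArg List.reverse h
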